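-- pv_equiv track=rewrite | github.com/Suhana-TT/polaris | workloads/EA-LSS/Reference/Validation/test_ffn.py | _head_params
-- ===== SOURCE A (Python) =====
-- def _head_params(in_ch, head_conv, num_classes, num_conv):
--     p = 0
--     c_in = in_ch
--     for _ in range(num_conv - 1):
--         p += c_in * head_conv + 2 * head_conv
--         c_in = head_conv
--     p += head_conv * num_classes + num_classes
--     return p
-- ===== SOURCE B (Python) =====
-- def _head_params(in_ch, head_conv, num_classes, num_conv):
--     tail = head_conv * num_classes + num_classes
--     if num_conv <= 1:
--         return tail
--     first = in_ch * head_conv + 2 * head_conv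
--     middle = (num_conv - 2) * (head_conv * head_conv + 2 * head_conv)
--     return first + middle + tail
-- ===== Notes on version B (the rewrite author's own statement) =====
-- stated objective: simpler
-- what changed: Replaces the accumulation loop over the conv layers with a closed-form arithmetic expression (first layer + (num_conv-2) identical middle layers + classifier tail), guarded for num_conv <= 1.
import Mathlib
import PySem

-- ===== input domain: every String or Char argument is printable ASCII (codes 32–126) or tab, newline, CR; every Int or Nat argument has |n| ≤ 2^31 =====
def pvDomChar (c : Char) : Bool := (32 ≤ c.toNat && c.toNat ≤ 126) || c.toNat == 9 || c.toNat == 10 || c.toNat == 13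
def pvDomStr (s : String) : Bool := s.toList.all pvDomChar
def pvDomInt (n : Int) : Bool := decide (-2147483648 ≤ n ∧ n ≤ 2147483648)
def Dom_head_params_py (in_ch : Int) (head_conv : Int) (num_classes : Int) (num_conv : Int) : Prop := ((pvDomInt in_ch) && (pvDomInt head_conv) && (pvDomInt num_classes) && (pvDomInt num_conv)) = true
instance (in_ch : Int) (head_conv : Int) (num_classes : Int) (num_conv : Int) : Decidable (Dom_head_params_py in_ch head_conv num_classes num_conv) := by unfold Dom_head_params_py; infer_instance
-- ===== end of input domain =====

-- ===== PORT A =====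
-- loop of A: runs (num_conv - 1).toNat times (Python range(num_conv-1)), threading (p, c_in)
def headLoopA : Nat → Int → Int → Int → Int
  | 0, p, _, _ => p
  | k+1, p, c_in, head_conv => headLoopA k (p + (c_in * head_conv + 2 * head_conv)) head_conv head_conv

def head_params_py (in_ch : Int) (head_conv : Int) (num_classes : Int) (num_conv : Int) : Int :=
  let p := headLoopA (num_conv - 1).toNat 0 in_ch head_conv
  p + (head_conv * num_classes + num_classes)

-- ===== PORT B =====
-- B: closed-form expression, no loop
def head_params_py_alt (in_ch : Int) (head_conv : Int) (num_classes : Int) (num_conv : Int) : Int :=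
  let tail := head_conv * num_classes + num_classes
  if num_conv ≤ 1 then tail
  else
    let first := in_ch * head_conv + 2 * head_conv
    let middle := (num_conv - 2) * (head_conv * head_conv + 2 * head_conv)
    first + middle + tail

-- ===== PRECONDITION & SPEC =====
def Spec_head_params_py (in_ch : Int) (head_conv : Int) (num_classes : Int) (num_conv : Int) (out : Int) : Prop := out = head_params_py_alt in_ch head_conv num_classes num_conv
instance (in_ch : Int) (head_conv : Int) (num_classes : Int) (num_conv : Int) (out : Int) : Decidable (Spec_head_params_py in_ch head_conv num_classes num_conv out) := by unfold Spec_head_params_py; infer_instance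

-- ===== CLAIM =====
def Claim_equal_head_params_py : Prop := ∀ (in_ch : Int) (head_conv : Int) (num_classes : Int) (num_conv : Int), Dom_head_params_py in_ch head_conv num_classes num_conv → Spec_head_params_py in_ch head_conv num_classes num_conv (head_params_py in_ch head_conv num_classes num_conv)

-- ===== LEMMAS AND PROOFS =====
theorem headLoopA_const (k : Nat) (p h : Int) :
    headLoopA k p h h = p + (k : Int) * (h * h + 2 * h) := by
  induction k generalizing p with
  | zero => simp [headLoopA]
  | succ n ih => simp [headLoopA, ih]; ring

-- ===== VERDICT =====
theorem head_params_py_spec : Claim_equal_head_params_py := by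
  intro in_ch h nc n _
  unfold Spec_head_params_py head_params_py head_params_py_alt
  by_cases hn : n ≤ 1
  · have : (n - 1).toNat = 0 := by omega
    simp [this, headLoopA, hn]
  · have h1 : (n - 1).toNat = (n - 2).toNat + 1 := by omega
    have h2 : ((n - 2).toNat : Int) = n - 2 := by omega
    simp only [h1, headLoopA, headLoopA_const]
    rw [if_neg hn, h2]; ring
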